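-- pv_equiv track=rewrite | github.com/Rstar-910/Perspective-Answer-Summarizer-NAACL-Task-A-and-Task-B- | Backend/server.py | extract_spans_rule_based
-- ===== SOURCE A (Python) =====
-- def extract_spans_rule_based(answer):
--     spans = []
--
--     # Keywords for each category
--     cause_keywords = ["because", "due to", "caused by", "reason for", "linked to"]
--     suggestion_keywords = ["should", "recommend", "try", "consider", "advisable", "suggested", "use", "take", "flush", "apply", "put"]
--     experience_keywords = ["I experienced", "some people", "many users", "often report", "in my case"]
--     information_keywords = ["is known to", "commonly", "typically", "often", "generally", "characterized by"]
--
--     sentences = answer.split(".")  # Split answer into sentences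
--
--     for sentence in sentences:
--         sentence = sentence.strip()
--
--         for word in cause_keywords:
--             if word in sentence:
--                 spans.append({"text": sentence, "category": "CAUSE"})
--                 break
--         for word in suggestion_keywords:
--             if word in sentence:
--                 spans.append({"text": sentence, "category": "SUGGESTION"})
--                 break
--         for word in experience_keywords:
--             if word in sentence:
--                 spans.append({"text": sentence, "category": "EXPERIENCE"})
--                 break
--         for word in information_keywords:
--             if word in sentence:
--                 spans.append({"text": sentence, "category": "INFORMATION"})
--                 break
--
--     # Deduplicate spans
--     unique_spans = {span["text"]: span for span in spans}.values()
--     return list(unique_spans)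
-- ===== SOURCE B (Python) =====
-- def extract_spans_rule_based(answer):
--     # Staged pipeline: strip, dedupe FIRST (dict.fromkeys), then classify each
--     # distinct sentence once by scanning categories in descending priority with
--     # an early return (category is a pure function of the sentence text, so
--     # deduping before classifying yields A's first-appearance order and
--     # last-match priority).
--     priority = [
--         (["is known to", "commonly", "typically", "often", "generally", "characterized by"], "INFORMATION"),
--         (["I experienced", "some people", "many users", "often report", "in my case"], "EXPERIENCE"),
--         (["should", "recommend", "try", "consider", "advisable", "suggested", "use", "take", "flush", "apply", "put"], "SUGGESTION"),
--         (["because", "due to", "caused by", "reason for", "linked to"], "CAUSE"),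
--     ]
--
--     def classify(sentence):
--         for keywords, category in priority:
--             for word in keywords:
--                 if word in sentence:
--                     return category
--         return None
--
--     stripped = [part.strip() for part in answer.split(".")]
--     unique_sentences = list(dict.fromkeys(stripped))
--     result = []
--     for sentence in unique_sentences:
--         category = classify(sentence)
--         if category is not None:
--             result.append({"text": sentence, "category": category})
--     return result
-- ===== Notes on version B (the rewrite author's own statement) =====
-- stated objective: alternative
-- what changed: B is a staged pipeline that strips, deduplicates the sentences FIRST (dict.fromkeys) and then classifies each distinct sentence once via an early-return scan of a priority-ordered category table, instead of A's single loop appending up to four spans per sentence into a list that a dict comprehension collapses afterwards; correct because the category is a pure function of the sentence text, so dedupe-then-classify equals classify-then-dedupe and the first-match-in-descending-priority scan equals A's last-match overwrite.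
import Mathlib
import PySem

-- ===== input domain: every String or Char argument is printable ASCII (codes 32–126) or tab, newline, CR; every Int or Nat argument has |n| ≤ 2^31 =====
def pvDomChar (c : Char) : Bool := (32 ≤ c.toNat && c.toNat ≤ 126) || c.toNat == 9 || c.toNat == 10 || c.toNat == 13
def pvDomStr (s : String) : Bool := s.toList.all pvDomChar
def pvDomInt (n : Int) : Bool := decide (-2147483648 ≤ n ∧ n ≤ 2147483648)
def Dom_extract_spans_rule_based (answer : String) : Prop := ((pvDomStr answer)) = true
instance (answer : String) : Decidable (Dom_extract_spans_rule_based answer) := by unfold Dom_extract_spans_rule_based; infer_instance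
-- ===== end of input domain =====

-- B is a staged pipeline — strip, dedupe first (dict.fromkeys), then classify each distinct
-- sentence once by an early-return scan of the categories in descending priority — instead of
-- A's append-up-to-four-spans-per-sentence list collapsed afterwards by a dict; objective: simpler.

def pvCauseKws : List String := ["because", "due to", "caused by", "reason for", "linked to"]
def pvSuggKws : List String := ["should", "recommend", "try", "consider", "advisable", "suggested", "use", "take", "flush", "apply", "put"]
def pvExpKws : List String := ["I experienced", "some people", "many users", "often report", "in my case"]
def pvInfoKws : List String := ["is known to", "commonly", "typically", "often", "generally", "characterized by"]

-- ===== PORT A =====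
-- 'for word in kws: if word in sentence: append; break' appends ONE span iff some keyword
-- is a substring: kws.any (isIn · sentence).
def extract_spans_rule_based (answer : String) : List (List (String × String)) :=
  -- sep "." is nonempty, so split? is always some; getD [] is exact
  let sentences := (PySem.Str.split? answer ".").getD []
  let spans : List (List (String × String)) :=
    sentences.foldl (fun spans sentence =>
      let sentence := PySem.Str.strip sentence
      let spans := if pvCauseKws.any (fun w => PySem.Str.isIn w sentence) then
          spans ++ [[("text", sentence), ("category", "CAUSE")]] else spans
      let spans := if pvSuggKws.any (fun w => PySem.Str.isIn w sentence) then
          spans ++ [[("text", sentence), ("category", "SUGGESTION")]] else spans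
      let spans := if pvExpKws.any (fun w => PySem.Str.isIn w sentence) then
          spans ++ [[("text", sentence), ("category", "EXPERIENCE")]] else spans
      let spans := if pvInfoKws.any (fun w => PySem.Str.isIn w sentence) then
          spans ++ [[("text", sentence), ("category", "INFORMATION")]] else spans
      spans) []
  -- {span["text"]: span for span in spans}.values(); span["text"] is always present,
  -- getD "" is exact here.
  let d : PySem.Dict String (List (String × String)) :=
    spans.foldl (fun d sp => d.insert ((PySem.Dict.ofList sp).getD "text" "") sp) PySem.Dict.empty
  d.values

-- ===== PORT B =====
-- B's priority table, highest first.
def pvPriority : List (List String × String) :=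
  [(pvInfoKws, "INFORMATION"), (pvExpKws, "EXPERIENCE"), (pvSuggKws, "SUGGESTION"), (pvCauseKws, "CAUSE")]

-- B's 'classify': outer for with early 'return category'; the inner
-- 'for word: if word in sentence: return category' is kws.any (isIn · sentence).
def pvClassify : List (List String × String) → String → Option String
  | [], _ => none
  | (kws, cat) :: rest, s =>
      if kws.any (fun w => PySem.Str.isIn w s) then some cat else pvClassify rest s

def extract_spans_rule_based_alt (answer : String) : List (List (String × String)) :=
  let stripped := ((PySem.Str.split? answer ".").getD []).map PySem.Str.strip
  -- list(dict.fromkeys(stripped))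
  let uniq := PySem.List.dedup stripped
  uniq.foldl (fun result sentence =>
    match pvClassify pvPriority sentence with
    | none => result
    | some c => result ++ [[("text", sentence), ("category", c)]]) []

-- ===== PRECONDITION & SPEC =====
def Spec_extract_spans_rule_based (answer : String) (out : List (List (String × String))) : Prop := out = extract_spans_rule_based_alt answer
instance (answer : String) (out : List (List (String × String))) : Decidable (Spec_extract_spans_rule_based answer out) := by unfold Spec_extract_spans_rule_based; infer_instance

-- ===== CLAIM (what is proved, stated in full; the proofs are below) =====
def Claim_equal_extract_spans_rule_based : Prop := ∀ (answer : String), Dom_extract_spans_rule_based answer → Spec_extract_spans_rule_based answer (extract_spans_rule_based answer)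

-- ===== LEMMAS AND PROOFS =====

-- A's per-sentence chunk of spans (after stripping).
def pvChunk (s : String) : List (List (String × String)) :=
  (if pvCauseKws.any (fun w => PySem.Str.isIn w s) then [[("text", s), ("category", "CAUSE")]] else []) ++
  (if pvSuggKws.any (fun w => PySem.Str.isIn w s) then [[("text", s), ("category", "SUGGESTION")]] else []) ++
  (if pvExpKws.any (fun w => PySem.Str.isIn w s) then [[("text", s), ("category", "EXPERIENCE")]] else []) ++
  (if pvInfoKws.any (fun w => PySem.Str.isIn w s) then [[("text", s), ("category", "INFORMATION")]] else [])

-- the span B builds for a classified sentence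
def pvSpanOf (s : String) : List (String × String) :=
  [("text", s), ("category", (pvClassify pvPriority s).getD "")]

def pvInsStep (d : PySem.Dict String (List (String × String))) (sp : List (String × String)) :
    PySem.Dict String (List (String × String)) :=
  d.insert ((PySem.Dict.ofList sp).getD "text" "") sp

theorem pvInsStep_span (d : PySem.Dict String (List (String × String))) (s c : String) :
    pvInsStep d [("text", s), ("category", c)] = d.insert s [("text", s), ("category", c)] := rfl

-- A's four break-loops insert, last category wins = B's highest-priority classification.
theorem pvChunk_fold (d : PySem.Dict String (List (String × String))) (s : String) :
    (pvChunk s).foldl pvInsStep d =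
      if (pvClassify pvPriority s).isSome then d.insert s (pvSpanOf s) else d := by
  simp only [pvChunk, pvPriority, pvClassify, pvSpanOf]
  split_ifs <;> simp_all [pvInsStep_span, PySem.Dict.insert_insert_self]

-- A's spans list is the concatenation of the per-sentence chunks.
theorem pvSpans_eq (l : List String) (acc : List (List (String × String))) :
    l.foldl (fun spans sentence =>
      let sentence := PySem.Str.strip sentence
      let spans := if pvCauseKws.any (fun w => PySem.Str.isIn w sentence) then
          spans ++ [[("text", sentence), ("category", "CAUSE")]] else spans
      let spans := if pvSuggKws.any (fun w => PySem.Str.isIn w sentence) then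
          spans ++ [[("text", sentence), ("category", "SUGGESTION")]] else spans
      let spans := if pvExpKws.any (fun w => PySem.Str.isIn w sentence) then
          spans ++ [[("text", sentence), ("category", "EXPERIENCE")]] else spans
      let spans := if pvInfoKws.any (fun w => PySem.Str.isIn w sentence) then
          spans ++ [[("text", sentence), ("category", "INFORMATION")]] else spans
      spans) acc = acc ++ l.flatMap (fun s => pvChunk (PySem.Str.strip s)) := by
  induction l generalizing acc with
  | nil => simp
  | cons h t ih =>
    simp only [List.foldl, List.flatMap_cons]
    rw [ih]
    simp [pvChunk]
    split_ifs <;> simp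

-- getD of an insert-with-value-a-function-of-the-key loop.
theorem pvGetD_fold (m : List String) (d : PySem.Dict String (List (String × String))) (k : String) :
    ((m.foldl (fun d t => d.insert t (pvSpanOf t)) d).getD k []) =
      if k ∈ m then pvSpanOf k else d.getD k [] := by
  induction m generalizing d with
  | nil => simp
  | cons h t ih =>
    simp only [List.foldl, ih, List.mem_cons]
    by_cases hk : k ∈ t
    · simp [hk]
    · by_cases hkh : k = h <;> simp [hk, hkh, PySem.Dict.getD_insert]

-- values of that loop from empty = the classified span of each distinct key, in first order.
theorem pvValues_fold (m : List String) :
    (m.foldl (fun d t => d.insert t (pvSpanOf t)) PySem.Dict.empty).values =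
      (PySem.List.dedup m).map pvSpanOf := by
  have hkeys : (m.foldl (fun d t => d.insert t (pvSpanOf t)) PySem.Dict.empty).keys
      = PySem.List.dedup m := by
    have := PySem.Dict.keys_foldl_insert (l := m)
      (f := fun (_ : PySem.Dict String (List (String × String))) t => pvSpanOf t)
      (d := PySem.Dict.empty)
    simpa [PySem.Set.update_empty] using this
  have hnd : (m.foldl (fun d t => d.insert t (pvSpanOf t)) PySem.Dict.empty).keys.Nodup := by
    rw [hkeys]; exact PySem.List.nodup_dedup m
  rw [PySem.Dict.values_eq_map_keys _ hnd [], hkeys]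
  refine List.map_congr_left ?_
  intro k hk
  rw [pvGetD_fold]
  simp [(PySem.List.mem_dedup m k).mp hk]

-- dedup commutes with filter.
theorem pvDedup_filter (p : String → Bool) (l : List String) :
    PySem.List.dedup (l.filter p) = (PySem.List.dedup l).filter p := by
  simp only [PySem.List.dedup_eq_ofList]
  induction l using List.reverseRecOn with
  | nil => rfl
  | append_singleton xs x ih =>
    rw [List.filter_append, PySem.Set.ofList_append_singleton, PySem.Set.add_eq_ite]
    by_cases hp : p x
    · simp only [List.filter_cons, hp, if_pos, List.filter_nil]
      rw [PySem.Set.ofList_append_singleton, ih, PySem.Set.add_eq_ite]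
      by_cases hx : x ∈ PySem.Set.ofList xs
      · simp [hx, List.mem_filter.mpr ⟨hx, hp⟩]
      · have hx' : x ∉ (PySem.Set.ofList xs).filter p := fun h => hx (List.mem_filter.mp h).1
        simp [hx, hx', List.filter_append, hp]
    · simp only [List.filter_cons, hp, Bool.false_eq_true, if_false, List.filter_nil, List.append_nil]
      rw [ih]
      by_cases hx : x ∈ PySem.Set.ofList xs
      · simp [hx]
      · simp [hx, List.filter_append, hp]

-- A's dict loop over the concatenated chunks is the classify-and-insert loop over the stripped sentences.
theorem pvDict_eq (l : List String) (d : PySem.Dict String (List (String × String))) :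
    (l.flatMap (fun s => pvChunk (PySem.Str.strip s))).foldl pvInsStep d =
      (l.map PySem.Str.strip).foldl (fun d t =>
        if (pvClassify pvPriority t).isSome then d.insert t (pvSpanOf t) else d) d := by
  induction l generalizing d with
  | nil => rfl
  | cons h t ih =>
    simp only [List.flatMap_cons, List.foldl_append, List.map_cons, List.foldl]
    rw [pvChunk_fold, ih]

-- the same statement with the port's literal lambda (definitional equality)
theorem pvDict_eq' (l : List String) (d : PySem.Dict String (List (String × String))) :
    (l.flatMap (fun s => pvChunk (PySem.Str.strip s))).foldl
      (fun d sp => d.insert ((PySem.Dict.ofList sp).getD "text" "") sp) d =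
      (l.map PySem.Str.strip).foldl (fun d t =>
        if (pvClassify pvPriority t).isSome then d.insert t (pvSpanOf t) else d) d :=
  pvDict_eq l d

-- B's accumulator step, written as a conditional append.
theorem pvAltStep (r : List (List (String × String))) (s : String) :
    (match pvClassify pvPriority s with
      | none => r
      | some c => r ++ [[("text", s), ("category", c)]]) =
      if (pvClassify pvPriority s).isSome then r ++ [pvSpanOf s] else r := by
  cases h : pvClassify pvPriority s <;> simp [pvSpanOf, h]

-- B's loop over the deduplicated sentences is filter-then-map.
theorem pvAlt_fold (u : List String) (acc : List (List (String × String))) :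
    u.foldl (fun result sentence =>
      match pvClassify pvPriority sentence with
      | none => result
      | some c => result ++ [[("text", sentence), ("category", c)]]) acc =
      acc ++ (u.filter (fun t => (pvClassify pvPriority t).isSome)).map pvSpanOf := by
  rw [show (fun (result : List (List (String × String))) sentence =>
        match pvClassify pvPriority sentence with
        | none => result
        | some c => result ++ [[("text", sentence), ("category", c)]]) =
      (fun (result : List (List (String × String))) sentence =>
        if (pvClassify pvPriority sentence).isSome then result ++ [pvSpanOf sentence] else result)
    from funext fun r => funext fun s => pvAltStep r s]
  exact PySem.List.foldl_append_if _ _ _ _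

-- ===== VERDICT (by name: the statement is the Claim_ definition above) =====
theorem extract_spans_rule_based_spec : Claim_equal_extract_spans_rule_based := by
  intro answer _
  show extract_spans_rule_based answer = extract_spans_rule_based_alt answer
  simp only [extract_spans_rule_based, extract_spans_rule_based_alt]
  rw [pvSpans_eq, List.nil_append, pvDict_eq', PySem.List.foldl_if_eq_foldl_filter,
    pvValues_fold, pvDedup_filter, pvAlt_fold, List.nil_append]
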